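-- pv_equiv track=rewrite | github.com/Jupiter-Jzhou/GlidedSky | anti_ip_block/proxy_pool.py | gen_pages_xla
-- ===== SOURCE A (Python) =====
-- def gen_pages_xla(page_need):
--     url_home = "http://www.xiladaili.com/"
--     url_gaoni = "http://www.xiladaili.com/gaoni/"   # 含https
--     for page in page_need:
--         if page == 1:
--             url_page = url_gaoni
--             referer = url_home
--         elif page == 2:
--             url_page = url_gaoni + f"{page}/"
--             referer = url_gaoni
--         else:
--             url_page = url_gaoni + f"{page}/"
--             referer = url_gaoni + f"{page-1}/"
--
--         yield url_page, referer
-- ===== SOURCE B (Python) =====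
-- def gen_pages_xla(page_need):
--     home = "http://www.xiladaili.com/"
--     gaoni = "http://www.xiladaili.com/gaoni/"
--
--     def url_of(p):
--         return gaoni if p == 1 else gaoni + f"{p}/"
--
--     # staged passes: build all page URLs, then all referers, then pair them up
--     urls = [url_of(p) for p in page_need]
--     refs = [home if p == 1 else url_of(p - 1) for p in page_need]
--     yield from zip(urls, refs)
-- ===== Notes on version B (the rewrite author's own statement) =====
-- stated objective: alternative
-- what changed: Replaces A's single fused loop with three branches by two staged comprehensions (one building the page-URL list, one building the referer list as url_of(page-1), home for page 1) zipped together at the end.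
import Mathlib
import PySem

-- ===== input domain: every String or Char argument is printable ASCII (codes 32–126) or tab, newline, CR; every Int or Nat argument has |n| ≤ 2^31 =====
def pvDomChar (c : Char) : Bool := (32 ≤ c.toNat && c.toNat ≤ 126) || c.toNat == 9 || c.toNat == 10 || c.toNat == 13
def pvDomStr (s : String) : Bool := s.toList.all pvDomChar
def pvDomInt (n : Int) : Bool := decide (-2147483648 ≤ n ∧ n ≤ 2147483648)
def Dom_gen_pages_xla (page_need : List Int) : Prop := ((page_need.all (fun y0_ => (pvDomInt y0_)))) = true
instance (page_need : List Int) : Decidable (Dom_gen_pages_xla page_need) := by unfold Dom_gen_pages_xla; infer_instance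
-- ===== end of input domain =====

-- B builds the page-URL list and the referer list in two separate passes and zips them, instead of A's single three-branch loop; same values.


-- ===== PORT A =====
def gen_pages_xla (page_need : List Int) : List (String × String) :=
  let url_home := "http://www.xiladaili.com/"
  let url_gaoni := "http://www.xiladaili.com/gaoni/"
  page_need.map (fun page =>
    if page == 1 then (url_gaoni, url_home)
    else if page == 2 then (url_gaoni ++ PySem.Int.toStr page ++ "/", url_gaoni)
    else (url_gaoni ++ PySem.Int.toStr page ++ "/",
          url_gaoni ++ PySem.Int.toStr (page - 1) ++ "/"))

-- ===== PORT B =====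
def pvUrlOf (p : Int) : String :=
  if p == 1 then "http://www.xiladaili.com/gaoni/"
  else "http://www.xiladaili.com/gaoni/" ++ PySem.Int.toStr p ++ "/"

def gen_pages_xla_alt (page_need : List Int) : List (String × String) :=
  let urls := page_need.map (fun p => pvUrlOf p)
  let refs := page_need.map (fun p =>
    if p == 1 then "http://www.xiladaili.com/" else pvUrlOf (p - 1))
  urls.zip refs

-- ===== PRECONDITION & SPEC =====
def Spec_gen_pages_xla (page_need : List Int) (out : List (String × String)) : Prop := out = gen_pages_xla_alt page_need
instance (page_need : List Int) (out : List (String × String)) : Decidable (Spec_gen_pages_xla page_need out) := by unfold Spec_gen_pages_xla; infer_instance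

-- ===== CLAIM (what is proved, stated in full; the proofs are below) =====
def Claim_equal_gen_pages_xla : Prop := ∀ (page_need : List Int), Dom_gen_pages_xla page_need → Spec_gen_pages_xla page_need (gen_pages_xla page_need)

-- ===== LEMMAS AND PROOFS =====
theorem pv_item_eq (page : Int) :
    (if page == 1 then ("http://www.xiladaili.com/gaoni/", "http://www.xiladaili.com/")
     else if page == 2 then ("http://www.xiladaili.com/gaoni/" ++ PySem.Int.toStr page ++ "/", "http://www.xiladaili.com/gaoni/")
     else ("http://www.xiladaili.com/gaoni/" ++ PySem.Int.toStr page ++ "/",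
           "http://www.xiladaili.com/gaoni/" ++ PySem.Int.toStr (page - 1) ++ "/"))
    = (pvUrlOf page, if page == 1 then "http://www.xiladaili.com/" else pvUrlOf (page - 1)) := by
  by_cases h1 : page = 1
  · simp [h1, pvUrlOf]
  · by_cases h2 : page = 2
    · subst h2; simp [pvUrlOf]
    · have h3 : page - 1 ≠ 1 := by omega
      simp [pvUrlOf, h1, h2, h3]

-- ===== VERDICT (by name: the statement is the Claim_ definition above) =====
theorem gen_pages_xla_spec : Claim_equal_gen_pages_xla := by
  intro page_need _
  unfold Spec_gen_pages_xla gen_pages_xla gen_pages_xla_alt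
  simp only [List.zip_map']
  exact List.map_congr_left (fun page _ => pv_item_eq page)
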